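-- pv_equiv track=rewrite | github.com/peter-steiner/adventofcode-2017 | d-2.py | findEven
-- ===== SOURCE A (Python) =====
-- def findEven(index, numbers):
--     divider = numbers[index]
--     result_arr = [n for n in numbers if n != divider and n % divider == 0]
--     if result_arr:
--         return result_arr[0] // divider
--     if index == len(numbers) - 1:
--         return 0
--     return findEven(index+1, numbers)
-- ===== SOURCE B (Python) =====
-- def findEven(index, numbers):
--     for i in range(index, len(numbers)):
--         d = numbers[i]
--         mults = [n for n in numbers if n != d and n % d == 0]
--         if mults:
--             return mults[0] // d
--     return 0
-- ===== Notes on version B (the rewrite author's own statement) =====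
-- stated objective: simpler
-- what changed: The tail recursion over the starting index is replaced by an explicit for-loop over range(index, len(numbers)) that returns on the first position whose divisibility filter is nonempty, dropping the recursive call and the explicit last-index base case.
import Mathlib
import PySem

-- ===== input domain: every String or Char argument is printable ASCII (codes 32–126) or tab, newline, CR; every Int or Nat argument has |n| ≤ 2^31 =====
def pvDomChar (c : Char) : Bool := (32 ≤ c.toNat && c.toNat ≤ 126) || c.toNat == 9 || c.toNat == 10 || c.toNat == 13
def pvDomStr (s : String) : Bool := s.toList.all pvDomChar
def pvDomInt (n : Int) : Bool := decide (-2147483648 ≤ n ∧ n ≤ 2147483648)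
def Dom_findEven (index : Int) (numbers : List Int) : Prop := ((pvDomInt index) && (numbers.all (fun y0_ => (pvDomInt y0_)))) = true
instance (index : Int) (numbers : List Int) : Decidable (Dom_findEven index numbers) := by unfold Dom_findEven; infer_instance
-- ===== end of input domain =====

-- B replaces A's tail recursion on the start index by an explicit loop over range(index, len(numbers)); simpler decomposition, same cost.

-- ===== PORT A =====
def findEven (index : Int) (numbers : List Int) : Int :=
  match _hidx : PySem.List.pyGet? numbers index with
  | none => 0  -- IndexError in Python; excluded by Pre_
  | some divider =>
    let result_arr := numbers.filter (fun n => decide (n ≠ divider) && decide (PySem.Int.mod n divider = 0))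
    match result_arr with
    | m :: _ => PySem.Int.floordiv m divider
    | [] =>
      if index = (numbers.length : Int) - 1 then 0
      else findEven (index + 1) numbers
termination_by ((numbers.length : Int) + 1 - index).toNat
decreasing_by
  have hir : PySem.Raise.InRange numbers.length index := by
    by_contra hc
    rw [(PySem.List.pyGet?_eq_none_iff _ _).mpr hc] at _hidx
    exact absurd _hidx (by simp)
  simp [PySem.Raise.InRange] at hir
  omega

-- ===== PORT B =====
def findEvenAltGo (numbers : List Int) : List Int → Int
  | [] => 0
  | i :: rest =>
    match PySem.List.pyGet? numbers i with
    | none => 0  -- IndexError in Python; excluded by Pre_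
    | some d =>
      match numbers.filter (fun n => decide (n ≠ d) && decide (PySem.Int.mod n d = 0)) with
      | m :: _ => PySem.Int.floordiv m d
      | [] => findEvenAltGo numbers rest

def findEven_alt (index : Int) (numbers : List Int) : Int :=
  findEvenAltGo numbers (PySem.List.pyRange index (numbers.length : Int) 1)

-- ===== PRECONDITION & SPEC =====
-- Pre_ is exactly where Python A returns: index in range (IndexError otherwise), and the divider at
-- index is nonzero unless every element is zero (otherwise ZeroDivisionError; a later divider is never
-- zero when reached, since a nonzero divider with 0 present in the list returns immediately).
def Pre_findEven (index : Int) (numbers : List Int) : Prop :=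
  -(numbers.length : Int) ≤ index ∧ index < (numbers.length : Int) ∧
  (PySem.List.pyGet? numbers index ≠ some 0 ∨ ∀ n ∈ numbers, n = 0)
instance (index : Int) (numbers : List Int) : Decidable (Pre_findEven index numbers) := by unfold Pre_findEven; infer_instance
def pvWitness_findEven : Int × List Int := (0, [2, 4, 7])
def Spec_findEven (index : Int) (numbers : List Int) (out : Int) : Prop := out = findEven_alt index numbers
instance (index : Int) (numbers : List Int) (out : Int) : Decidable (Spec_findEven index numbers out) := by unfold Spec_findEven; infer_instance

-- ===== CLAIM (what is proved, stated in full; the proofs are below) =====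
def Claim_equal_findEven : Prop := ∀ (index : Int) (numbers : List Int), Dom_findEven index numbers → Pre_findEven index numbers → Spec_findEven index numbers (findEven index numbers)

-- ===== LEMMAS AND PROOFS =====

-- A's recursion from i computes exactly B's loop over range(i, len numbers); induction on len - i.
theorem findEven_eq_go (numbers : List Int) (k : Nat) :
    ∀ i : Int, ((numbers.length : Int) - i).toNat = k →
      findEven i numbers = findEvenAltGo numbers (PySem.List.pyRange i (numbers.length : Int) 1) := by
  induction k with
  | zero =>
    intro i hk
    have hge : (numbers.length : Int) ≤ i := by omega
    have hnone : PySem.List.pyGet? numbers i = none := by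
      rw [PySem.List.pyGet?_eq_none_iff]
      simp [PySem.Raise.InRange]
      omega
    rw [PySem.List.pyRange_one_eq_nil hge, findEven]
    split
    · simp [findEvenAltGo]
    · next divider h => rw [hnone] at h; simp at h
  | succ k ih =>
    intro i hk
    have hlt : i < (numbers.length : Int) := by omega
    rw [PySem.List.pyRange_one_cons hlt, findEven]
    split
    · next hnone => rw [findEvenAltGo]; simp [hnone]
    · next d hd =>
      rw [findEvenAltGo]
      simp only [hd]
      cases List.filter (fun n => decide (n ≠ d) && decide (PySem.Int.mod n d = 0)) numbers with
      | cons _ _ => simp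
      | nil =>
        by_cases hlast : i = (numbers.length : Int) - 1
        · rw [if_pos hlast, PySem.List.pyRange_one_eq_nil (by omega : (numbers.length : Int) ≤ i + 1)]
          simp [findEvenAltGo]
        · rw [if_neg hlast, ih (i + 1) (by omega)]

-- ===== VERDICT (by name: the statement is the Claim_ definition above) =====
theorem findEven_spec : Claim_equal_findEven := by
  intro index numbers _ _
  unfold Spec_findEven findEven_alt
  exact findEven_eq_go numbers _ index rfl
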